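-- pv_equiv track=rewrite | github.com/sobir-git/num-seq-ai | seq_predict/helper.py | match_seq
-- ===== SOURCE A (Python) =====
-- def match_seq(s, seq):
--     """try to match the sequences s[i:] to seq[a:b] (b < len(s2))
--     return a tuple: (the size of the longest match, seq[b])
--
--     Arguments:
--         s: sequence to match
--         seq: sequence to be matched with
--     """
--
--     match_size, match_b = 0, len(seq) - 1
--     for b in range(len(seq) - 2, -1, -1):
--         b_, j = b, len(s) - 1
--         fail = False
--
--         while b_ != -1 and j != -1:
--             if seq[b_] != s[j]:
--                 fail = True
--                 break
--             b_, j = b_ - 1, j - 1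
--
--         if not fail and match_size < b - b_:
--             match_size = b - b_
--             match_b = b
--
--     if match_size < 3:
--         return (0, None)
--
--     return (match_size, seq[match_b + 1])
-- ===== SOURCE B (Python) =====
-- def match_seq(s, seq):
--     """Z-algorithm re-implementation: linear time instead of a quadratic
--     per-position backward scan."""
--     n, m = len(seq), len(s)
--     # Z-array of t = reversed(s) + [None] + reversed(seq); None matches nothing,
--     # so z[m+1+k] = length of the common prefix of reversed(s) and reversed(seq)[k:].
--     t = s[::-1] + [None] + seq[::-1]
--     L = len(t)
--     z = [0] * L
--     l = r = 0
--     for i in range(1, L):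
--         k = min(z[i - l], r - i) if i < r else 0
--         while i + k < L and t[k] == t[i + k]:
--             k += 1
--         z[i] = k
--         if i + k > r:
--             l, r = i, i + k
--     best_size, best_b = 0, n - 1
--     for b in range(n - 1):
--         c = z[m + 1 + (n - 1 - b)]
--         # a candidate counts only if the whole overlap matches
--         if c == min(b + 1, m) and c >= best_size:
--             best_size, best_b = c, b
--     if best_size < 3:
--         return (0, None)
--     return (best_size, seq[best_b + 1])
-- ===== Notes on version B (the rewrite author's own statement) =====
-- stated objective: faster
-- what changed: A rescans backwards from every end position b (O(n*m) worst case); B builds the Z-array of reversed(s) + [None] + reversed(seq) in one linear pass and reads each match length from it.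
import Mathlib
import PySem

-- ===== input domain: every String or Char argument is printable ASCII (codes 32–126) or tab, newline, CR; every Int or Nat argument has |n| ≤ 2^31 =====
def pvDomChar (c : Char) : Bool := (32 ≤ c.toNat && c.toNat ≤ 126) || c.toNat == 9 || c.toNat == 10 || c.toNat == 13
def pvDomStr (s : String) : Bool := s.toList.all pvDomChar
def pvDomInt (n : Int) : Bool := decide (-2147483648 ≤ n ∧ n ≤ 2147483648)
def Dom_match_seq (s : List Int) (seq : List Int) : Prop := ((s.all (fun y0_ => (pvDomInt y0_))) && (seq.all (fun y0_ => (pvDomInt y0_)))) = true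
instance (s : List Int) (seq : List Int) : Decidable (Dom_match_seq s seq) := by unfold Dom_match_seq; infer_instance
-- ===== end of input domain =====

-- B replaces A's quadratic per-position backward rescans by a single Z-algorithm pass
-- over reversed(s) ++ [None] ++ reversed(seq); return values are identical.

-- ===== PORT A =====
-- inner while-loop of A; the fuel (b_+1).toNat bounds the iteration count, and when it
-- reaches 0 we have b_ = -1, where the Python loop exits with fail = False too,
-- so the fuel-0 branch coincides with the loop exit
def matchSeqInner (seq s : List Int) : Nat → Int → Int → Bool × Int
  | 0, b_, _ => (false, b_)
  | fuel+1, b_, j =>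
    if b_ = -1 ∨ j = -1 then (false, b_)
    else if PySem.List.pyGet? seq b_ ≠ PySem.List.pyGet? s j then (true, b_)
    else matchSeqInner seq s fuel (b_ - 1) (j - 1)

-- body of A's `for b in range(len(seq)-2, -1, -1)` loop, state (match_size, match_b)
def matchSeqStep (s seq : List Int) (st : Int × Int) (b : Int) : Int × Int :=
  let r := matchSeqInner seq s (b + 1).toNat b ((s.length : Int) - 1)
  if r.1 = false ∧ st.1 < b - r.2 then (b - r.2, b) else st

def match_seq (s : List Int) (seq : List Int) : Int × Option Int :=
  let st := (PySem.List.pyRange ((seq.length : Int) - 2) (-1) (-1)).foldl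
    (matchSeqStep s seq) (0, (seq.length : Int) - 1)
  if st.1 < 3 then (0, none)
  else (st.1, PySem.List.pyGet? seq (st.2 + 1))

-- ===== PORT B =====
-- B's `while i+k < L and t[k] == t[i+k]: k += 1`
def zExtend (t : List (Option Int)) (i : Nat) (k : Nat) : Nat :=
  if h : i + k < t.length ∧ t[k]! = t[i + k]! then zExtend t i (k + 1) else k
  termination_by t.length - (i + k)
  decreasing_by omega

-- body of B's Z-loop `for i in range(1, L)`, state (z, l, r)
def zStep (t : List (Option Int)) (st : List Nat × Nat × Nat) (i : Nat) :
    List Nat × Nat × Nat :=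
  let z := st.1; let l := st.2.1; let r := st.2.2
  let k0 := if i < r then min (z[i - l]!) (r - i) else 0
  let k := zExtend t i k0
  let z' := z.set i k
  if r < i + k then (z', i, i + k) else (z', l, r)

-- body of B's `for b in range(n-1)` loop, state (best_size, best_b)
def bestStep (z : List Nat) (m n : Nat) (st : Nat × Nat) (b : Nat) : Nat × Nat :=
  let c := z[m + 1 + (n - 1 - b)]!
  if c = min (b + 1) m ∧ st.1 ≤ c then (c, b) else st

def match_seq_alt (s : List Int) (seq : List Int) : Int × Option Int :=
  let n := seq.length
  let m := s.length
  let t : List (Option Int) := s.reverse.map some ++ [none] ++ seq.reverse.map some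
  let L := t.length
  let zfin := (List.range' 1 (L - 1)).foldl (zStep t) (List.replicate L 0, 0, 0)
  let st := (List.range (n - 1)).foldl (bestStep zfin.1 m n) (0, n - 1)
  if st.1 < 3 then (0, none) else ((st.1 : Int), seq[st.2 + 1]?)

-- ===== PRECONDITION & SPEC =====
def Spec_match_seq (s : List Int) (seq : List Int) (out : Int × Option Int) : Prop := out = match_seq_alt s seq
instance (s : List Int) (seq : List Int) (out : Int × Option Int) : Decidable (Spec_match_seq s seq out) := by unfold Spec_match_seq; infer_instance

-- ===== CLAIM =====
def Claim_equal_match_seq : Prop := ∀ (s : List Int) (seq : List Int), Dom_match_seq s seq → Spec_match_seq s seq (match_seq s seq)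

-- ===== LEMMAS AND PROOFS =====

-- length of the longest common prefix of two lists
def lcpN {α : Type} [DecidableEq α] : List α → List α → Nat
  | a :: as, b :: bs => if a = b then lcpN as bs + 1 else 0
  | _, _ => 0

theorem lcpN_cons {α : Type} [DecidableEq α] (a b : α) (as bs : List α) :
    lcpN (a :: as) (b :: bs) = if a = b then lcpN as bs + 1 else 0 := rfl

theorem lcpN_nil_left {α : Type} [DecidableEq α] (Y : List α) : lcpN [] Y = 0 := by
  cases Y <;> rfl

theorem lcpN_nil_right {α : Type} [DecidableEq α] (X : List α) : lcpN X [] = 0 := by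
  cases X <;> rfl

theorem lcpN_le_left {α : Type} [DecidableEq α] :
    ∀ (X Y : List α), lcpN X Y ≤ X.length
  | [], Y => by simp [lcpN_nil_left]
  | a :: as, [] => by simp [lcpN_nil_right]
  | a :: as, b :: bs => by
    rw [lcpN_cons]
    split_ifs
    · exact Nat.succ_le_succ (lcpN_le_left as bs)
    · omega

theorem lcpN_le_right {α : Type} [DecidableEq α] :
    ∀ (X Y : List α), lcpN X Y ≤ Y.length
  | [], Y => by simp [lcpN_nil_left]
  | a :: as, [] => by simp [lcpN_nil_right]
  | a :: as, b :: bs => by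
    rw [lcpN_cons]
    split_ifs
    · exact Nat.succ_le_succ (lcpN_le_right as bs)
    · omega

theorem lcpN_get {α : Type} [DecidableEq α] :
    ∀ (X Y : List α) (j : Nat), j < lcpN X Y → X[j]? = Y[j]?
  | [], Y, j, h => by simp [lcpN_nil_left] at h
  | a :: as, [], j, h => by simp [lcpN_nil_right] at h
  | a :: as, b :: bs, j, h => by
    rw [lcpN_cons] at h
    split_ifs at h with hab
    · cases j with
      | zero => simp [hab]
      | succ j' => simpa using lcpN_get as bs j' (by omega)
    · omega

theorem lcpN_stop {α : Type} [DecidableEq α] :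
    ∀ (X Y : List α), lcpN X Y < X.length → lcpN X Y < Y.length →
      X[lcpN X Y]? ≠ Y[lcpN X Y]?
  | [], Y, h1, _ => by simp at h1
  | a :: as, [], _, h2 => by simp at h2
  | a :: as, b :: bs, h1, h2 => by
    by_cases hab : a = b
    · subst hab
      rw [lcpN_cons, if_pos rfl] at h1 h2 ⊢
      have h1' : lcpN as bs < as.length := by simpa using h1
      have h2' : lcpN as bs < bs.length := by simpa using h2
      simpa using lcpN_stop as bs h1' h2'
    · rw [lcpN_cons, if_neg hab]
      simpa using hab

theorem lcpN_ge {α : Type} [DecidableEq α] :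
    ∀ (X Y : List α) (v : Nat),
      (∀ j, j < v → ∃ a, X[j]? = some a ∧ Y[j]? = some a) → v ≤ lcpN X Y := by
  intro X
  induction X with
  | nil =>
    intro Y v h
    cases v with
    | zero => omega
    | succ v' =>
      obtain ⟨a, ha, _⟩ := h 0 (by omega)
      simp at ha
  | cons a as ih =>
    intro Y v h
    cases v with
    | zero => omega
    | succ v' =>
      obtain ⟨c, hc1, hc2⟩ := h 0 (by omega)
      cases Y with
      | nil => simp at hc2
      | cons b bs =>
        simp at hc1 hc2
        subst hc1
        subst hc2
        rw [lcpN_cons, if_pos rfl]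
        have : v' ≤ lcpN as bs := by
          apply ih
          intro j hj
          obtain ⟨x, hx1, hx2⟩ := h (j + 1) (by omega)
          exact ⟨x, by simpa using hx1, by simpa using hx2⟩
        omega

theorem lcpN_comm {α : Type} [DecidableEq α] :
    ∀ (X Y : List α), lcpN X Y = lcpN Y X
  | [], Y => by simp [lcpN_nil_left, lcpN_nil_right]
  | a :: as, [] => by simp [lcpN_nil_left, lcpN_nil_right]
  | a :: as, b :: bs => by
    rw [lcpN_cons, lcpN_cons]
    rcases eq_or_ne a b with h | h
    · subst h; simp [lcpN_comm as bs]
    · simp [h, Ne.symm h]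

-- the `none` separator matches nothing, so lcp over the concatenation is lcp of the parts
theorem lcpN_sep (W : List (Option Int)) :
    ∀ (xs zs : List Int),
      lcpN (xs.map some ++ none :: W) (zs.map some) = lcpN xs zs
  | [], zs => by cases zs <;> simp [lcpN, lcpN_nil_right]
  | x :: xs, [] => by simp [lcpN_nil_right]
  | x :: xs, z :: zs => by
    simp only [List.map_cons, List.cons_append, lcpN_cons]
    rcases eq_or_ne x z with h | h
    · subst h; simp [lcpN_sep W xs zs]
    · simp [h]

-- the Z-value at i: lcp of t with its suffix from i
def zval (t : List (Option Int)) (i : Nat) : Nat := lcpN t (t.drop i)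

theorem zval_le (t : List (Option Int)) (i : Nat) : zval t i ≤ t.length - i := by
  have := lcpN_le_right t (t.drop i)
  simpa [zval] using this

theorem get!_some {α : Type} [Inhabited α] (l : List α) (j : Nat) (h : j < l.length) :
    l[j]? = some l[j]! := by
  rw [List.getElem!_eq_getElem?_getD, List.getElem?_eq_getElem h]
  rfl

theorem getElem!_set' {α : Type} [Inhabited α] (z : List α) (i j : Nat) (v : α) :
    (z.set i v)[j]! = if i = j ∧ i < z.length then v else z[j]! := by
  by_cases h : i = j ∧ i < z.length
  · obtain ⟨rfl, hi⟩ := h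
    rw [if_pos ⟨rfl, hi⟩, List.getElem!_eq_getElem?_getD, List.getElem?_set_self hi]
    rfl
  · rw [if_neg h]
    by_cases hij : i = j
    · subst hij
      have hni : ¬ i < z.length := fun hl => h ⟨rfl, hl⟩
      rw [List.getElem!_eq_getElem?_getD, List.getElem!_eq_getElem?_getD,
        List.getElem?_set, if_pos rfl, if_neg hni, List.getElem?_eq_none (by omega)]
    · rw [List.getElem!_eq_getElem?_getD, List.getElem!_eq_getElem?_getD,
        List.getElem?_set_ne hij]

theorem zExtend_eq (t : List (Option Int)) (i : Nat) (hi : 1 ≤ i) :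
    ∀ (k : Nat), k ≤ zval t i → zExtend t i k = zval t i := by
  have key : ∀ (d k : Nat), zval t i - k = d → k ≤ zval t i → zExtend t i k = zval t i := by
    intro d
    induction d with
    | zero =>
      intro k h0 hk
      have hk' : k = zval t i := by omega
      subst hk'
      rw [zExtend, dif_neg]
      rintro ⟨hlt, heq⟩
      have hX : zval t i < t.length := by omega
      have hY : zval t i < (t.drop i).length := by
        rw [List.length_drop]; omega
      have hne : t[zval t i]? ≠ t[i + zval t i]? := by
        have h' := lcpN_stop t (t.drop i) hX hY
        rwa [List.getElem?_drop] at h'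
      apply hne
      rw [get!_some t (zval t i) hX, get!_some t (i + zval t i) (by omega), heq]
    | succ d ih =>
      intro k h0 hk
      have hklt : k < zval t i := by omega
      have hzle := zval_le t i
      have hik : i + k < t.length := by omega
      have heq : t[k]! = t[i + k]! := by
        have hg := lcpN_get t (t.drop i) k hklt
        rw [List.getElem?_drop] at hg
        have e1 := get!_some t k (by omega)
        have e2 := get!_some t (i + k) hik
        rw [e1, e2] at hg
        exact Option.some_injective _ hg
      rw [zExtend, dif_pos ⟨hik, heq⟩]
      exact ih (k + 1) (by omega) (by omega)
  intro k hk
  exact key (zval t i - k) k rfl hk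

-- z-loop invariant
def ZInv (t : List (Option Int)) (i : Nat) (st : List Nat × Nat × Nat) : Prop :=
  st.1.length = t.length ∧
  (∀ j, 1 ≤ j → j < i → st.1[j]! = zval t j) ∧
  (st.2.1 = 0 ∧ st.2.2 = 0 ∨
    (1 ≤ st.2.1 ∧ st.2.1 < i ∧ st.2.2 = st.2.1 + zval t st.2.1))

theorem zStep_inv (t : List (Option Int)) (i : Nat) (st : List Nat × Nat × Nat)
    (hi : 1 ≤ i) (hiL : i < t.length) (h : ZInv t i st) :
    ZInv t (i + 1) (zStep t st i) := by
  obtain ⟨hlen, hz, hbox⟩ := h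
  have hk0 : (if i < st.2.2 then min (st.1[i - st.2.1]!) (st.2.2 - i) else 0) ≤ zval t i := by
    split_ifs with hir
    · rcases hbox with ⟨hl0, hr0⟩ | ⟨hl1, hli, hr⟩
      · omega
      · have hzd : st.1[i - st.2.1]! = zval t (i - st.2.1) :=
          hz (i - st.2.1) (by omega) (by omega)
        rw [hzd]
        have hrL : st.2.2 ≤ t.length := by
          have := zval_le t st.2.1; omega
        apply lcpN_ge
        intro j hj
        have hj1 : j < zval t (i - st.2.1) := by omega
        have hj2 : j < st.2.2 - i := by omega
        have hijL : i + j < t.length := by omega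
        have e1 : t[j]? = t[(i - st.2.1) + j]? := by
          have hg := lcpN_get t (t.drop (i - st.2.1)) j hj1
          rwa [List.getElem?_drop] at hg
        have e2 : t[(i - st.2.1) + j]? = t[i + j]? := by
          have hlt : (i - st.2.1) + j < zval t st.2.1 := by omega
          have hg := lcpN_get t (t.drop st.2.1) ((i - st.2.1) + j) hlt
          rw [List.getElem?_drop] at hg
          rwa [show st.2.1 + ((i - st.2.1) + j) = i + j by omega] at hg
        refine ⟨t[i + j]!, ?_, ?_⟩
        · rw [e1, e2]; exact get!_some t (i + j) hijL
        · rw [List.getElem?_drop]; exact get!_some t (i + j) hijL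
    · exact Nat.zero_le _
  have hkz : zExtend t i (if i < st.2.2 then min (st.1[i - st.2.1]!) (st.2.2 - i) else 0)
      = zval t i := zExtend_eq t i hi _ hk0
  have hlen' : i < st.1.length := by omega
  simp only [zStep, hkz]
  have hsetlen : (st.1.set i (zval t i)).length = t.length := by
    rw [List.length_set]; exact hlen
  have hget : ∀ j, 1 ≤ j → j < i + 1 → (st.1.set i (zval t i))[j]! = zval t j := by
    intro j hj1 hj2
    rw [getElem!_set']
    rcases eq_or_ne i j with he | hne
    · rw [if_pos ⟨he, hlen'⟩, he]
    · rw [if_neg (by tauto)]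
      exact hz j hj1 (by omega)
  split_ifs with hcond
  · exact ⟨hsetlen, hget, Or.inr ⟨hi, Nat.lt_succ_self i, rfl⟩⟩
  · refine ⟨hsetlen, hget, ?_⟩
    rcases hbox with ⟨hl0, hr0⟩ | ⟨hl1, hli, hr⟩
    · exact absurd hcond (by omega)
    · exact Or.inr ⟨hl1, show st.2.1 < i + 1 by omega, hr⟩

theorem zLoop_inv (t : List (Option Int)) :
    ∀ (cnt start : Nat) (st : List Nat × Nat × Nat), 1 ≤ start →
      start + cnt ≤ t.length → ZInv t start st →
      ZInv t (start + cnt) ((List.range' start cnt).foldl (zStep t) st) := by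
  intro cnt
  induction cnt with
  | zero => intro start st h1 h2 h3; simpa using h3
  | succ c ih =>
    intro start st h1 h2 h3
    rw [List.range'_succ]
    have := ih (start + 1) (zStep t st start) (by omega) (by omega)
      (zStep_inv t start st h1 (by omega) h3)
    simp only [List.foldl_cons]
    have he : start + 1 + c = start + (c + 1) := by omega
    rw [← he]
    exact this

-- (seq.take (k+1)).reverse starts with seq[k]
theorem take_rev (xs : List Int) (k : Nat) (h : k < xs.length) :
    (xs.take (k + 1)).reverse = xs[k] :: (xs.take k).reverse := by
  rw [List.take_succ, List.getElem?_eq_getElem h]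
  simp

-- match length of A at end-position b: common prefix of reversed seq[:b+1] and reversed s
def mlv (s seq : List Int) (b : Nat) : Nat := lcpN ((seq.take (b + 1)).reverse) s.reverse

-- a candidate b counts for A only if the whole overlap matches
def okB (s seq : List Int) (b : Nat) : Prop := mlv s seq b = min (b + 1) s.length

theorem mlv_le (s seq : List Int) (b : Nat) (h : b < seq.length) :
    mlv s seq b ≤ min (b + 1) s.length := by
  have h1 := lcpN_le_left ((seq.take (b + 1)).reverse) s.reverse
  have h2 := lcpN_le_right ((seq.take (b + 1)).reverse) s.reverse
  simp only [List.length_reverse, List.length_take] at h1 h2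
  unfold mlv
  omega

-- A's inner while loop computes the truncated common-suffix length
theorem inner_char (s seq : List Int) :
    ∀ (p q : Nat), p ≤ seq.length → q ≤ s.length →
      matchSeqInner seq s p ((p : Int) - 1) ((q : Int) - 1)
        = (decide (lcpN ((seq.take p).reverse) ((s.take q).reverse) < min p q),
           (p : Int) - 1 - (lcpN ((seq.take p).reverse) ((s.take q).reverse) : Int)) := by
  intro p
  induction p with
  | zero =>
    intro q hp hq
    simp [matchSeqInner, lcpN_nil_left]
  | succ p ih =>
    intro q hp hq
    have e1 : ((p + 1 : Nat) : Int) - 1 = ((p : Nat) : Int) := by push_cast; ring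
    cases q with
    | zero =>
      simp only [matchSeqInner, e1]
      rw [if_pos (by norm_num)]
      simp [lcpN_nil_right]
    | succ q' =>
      have e2 : ((q' + 1 : Nat) : Int) - 1 = ((q' : Nat) : Int) := by push_cast; ring
      have hps : p < seq.length := by omega
      have hqs : q' < s.length := by omega
      simp only [matchSeqInner, e1, e2]
      rw [if_neg (by rintro (h | h) <;> omega)]
      rw [PySem.List.pyGet?_natCast, PySem.List.pyGet?_natCast,
        List.getElem?_eq_getElem hps, List.getElem?_eq_getElem hqs]
      rw [take_rev seq p hps, take_rev s q' hqs, lcpN_cons]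
      by_cases hv : seq[p] = s[q']
      · rw [if_pos hv, if_neg (by simp [hv])]
        have hrec := ih q' (by omega) (by omega)
        rw [hrec]
        simp only [Prod.mk.injEq]
        refine ⟨?_, ?_⟩
        · rw [decide_eq_decide, Nat.succ_min_succ]
          omega
        · push_cast; ring
      · rw [if_neg hv, if_pos (by simp [hv])]
        simp only [Prod.mk.injEq]
        refine ⟨?_, ?_⟩
        · rw [eq_comm, decide_eq_true_eq, Nat.lt_min]
          omega
        · push_cast; ring

-- invariant of A's descending scan: st summarizes the already-processed b ∈ [k, n-1)
def AInv (s seq : List Int) (k : Nat) (st : Int × Int) : Prop :=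
  (st = (0, (seq.length : Int) - 1) ∧
    ∀ b, k ≤ b → b < seq.length - 1 → okB s seq b → mlv s seq b = 0) ∨
  (∃ bs : Nat, st = ((mlv s seq bs : Int), (bs : Int)) ∧ okB s seq bs ∧ k ≤ bs ∧
    bs < seq.length - 1 ∧ 0 < mlv s seq bs ∧
    ∀ b, k ≤ b → b < seq.length - 1 → okB s seq b →
      mlv s seq b ≤ mlv s seq bs ∧ (mlv s seq b = mlv s seq bs → b ≤ bs))

-- one descending step of A preserves the invariant
theorem aStep_inv (s seq : List Int) (k : Nat) (st : Int × Int)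
    (hk : k < seq.length - 1) (h : AInv s seq (k + 1) st) :
    AInv s seq k (matchSeqStep s seq st (k : Int)) := by
  have hn1 : 1 ≤ seq.length := by omega
  have hinner := inner_char s seq (k + 1) s.length (by omega) (le_refl _)
  rw [List.take_length] at hinner
  have ecast : ((k + 1 : Nat) : Int) - 1 = ((k : Nat) : Int) := by push_cast; ring
  have etn : (((k : Nat) : Int) + 1).toNat = k + 1 := by omega
  have hml := mlv_le s seq k (by omega)
  unfold matchSeqStep
  rw [etn]
  rw [ecast] at hinner
  have hinner' : matchSeqInner seq s (k + 1) ((k : Nat) : Int) ((s.length : Int) - 1)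
      = (decide (mlv s seq k < min (k + 1) s.length),
         ((k : Nat) : Int) - ((mlv s seq k : Nat) : Int)) := hinner
  rw [hinner']
  show AInv s seq k
    (if (decide (mlv s seq k < min (k + 1) s.length)) = false ∧
        st.1 < ((k : Nat) : Int) - (((k : Nat) : Int) - ((mlv s seq k : Nat) : Int))
      then (((k : Nat) : Int) - (((k : Nat) : Int) - ((mlv s seq k : Nat) : Int)), ((k : Nat) : Int))
      else st)
  have harg : ((k : Nat) : Int) - (((k : Nat) : Int) - (mlv s seq k : Int)) = (mlv s seq k : Int) := by ring
  rw [harg]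
  by_cases hok : okB s seq k
  · -- candidate: whole overlap matches
    have hnd : ¬ (mlv s seq k < min (k + 1) s.length) := by
      unfold okB at hok; omega
    by_cases hup : st.1 < (mlv s seq k : Int)
    · rw [if_pos ⟨by simp [hnd], hup⟩]
      -- new best is k
      rcases h with ⟨hst, hall⟩ | ⟨bs, hst, hbok, hbk, hbn, hbpos, hball⟩
      · have hpos : 0 < mlv s seq k := by
          rw [hst] at hup; simp only at hup; exact_mod_cast hup
        right
        refine ⟨k, rfl, hok, le_refl _, hk, hpos, ?_⟩
        intro b hb1 hb2 hbo
        rcases Nat.eq_or_lt_of_le hb1 with heq | hb1'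
        · rw [← heq]
          omega
        · have := hall b (by omega) hb2 hbo
          omega
      · have hlt : mlv s seq bs < mlv s seq k := by
          rw [hst] at hup; simp only at hup; exact_mod_cast hup
        right
        refine ⟨k, rfl, hok, le_refl _, hk, by omega, ?_⟩
        intro b hb1 hb2 hbo
        rcases Nat.eq_or_lt_of_le hb1 with heq | hb1'
        · rw [← heq]
          omega
        · have h1 := hball b (by omega) hb2 hbo
          exact ⟨by omega, fun he => by omega⟩
    · rw [if_neg (by tauto)]
      -- value not larger: extend quantifiers to k
      rcases h with ⟨hst, hall⟩ | ⟨bs, hst, hbok, hbk, hbn, hbpos, hball⟩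
      · have hz : mlv s seq k = 0 := by
          rw [hst] at hup
          simp only [not_lt] at hup
          have : (mlv s seq k : Int) ≤ 0 := by exact_mod_cast hup
          omega
        left
        refine ⟨hst, ?_⟩
        intro b hb1 hb2 hbo
        rcases Nat.eq_or_lt_of_le hb1 with heq | hb1'
        · rw [← heq]; exact hz
        · exact hall b (by omega) hb2 hbo
      · have hle : mlv s seq k ≤ mlv s seq bs := by
          rw [hst] at hup
          simp only [not_lt] at hup
          exact_mod_cast hup
        right
        refine ⟨bs, hst, hbok, by omega, hbn, hbpos, ?_⟩
        intro b hb1 hb2 hbo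
        rcases Nat.eq_or_lt_of_le hb1 with heq | hb1'
        · rw [← heq]
          exact ⟨hle, fun _ => by omega⟩
        · exact hball b (by omega) hb2 hbo
  · -- not a candidate: the fail-bit is set, state unchanged
    have hd : mlv s seq k < min (k + 1) s.length := by
      unfold okB at hok; omega
    rw [if_neg (by rintro ⟨h1, -⟩; rw [decide_eq_false_iff_not] at h1; exact h1 hd)]
    rcases h with ⟨hst, hall⟩ | ⟨bs, hst, hbok, hbk, hbn, hbpos, hball⟩
    · left
      refine ⟨hst, ?_⟩
      intro b hb1 hb2 hbo
      rcases Nat.eq_or_lt_of_le hb1 with rfl | hb1'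
      · exact absurd hbo hok
      · exact hall b (by omega) hb2 hbo
    · right
      refine ⟨bs, hst, hbok, by omega, hbn, hbpos, ?_⟩
      intro b hb1 hb2 hbo
      rcases Nat.eq_or_lt_of_le hb1 with rfl | hb1'
      · exact absurd hbo hok
      · exact hball b (by omega) hb2 hbo

-- A's whole descending loop, from an invariant summary to the full summary
theorem afold_inv (s seq : List Int) :
    ∀ (k : Nat), k ≤ seq.length - 1 → ∀ (st : Int × Int), AInv s seq k st →
      AInv s seq 0
        ((List.range k).foldr (fun (j : Nat) st => matchSeqStep s seq st (j : Int)) st) := by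
  intro k
  induction k with
  | zero => intro _ st h; simpa using h
  | succ k ih =>
    intro hk st h
    rw [List.range_succ, List.foldr_append]
    exact ih (by omega) _ (aStep_inv s seq k st (by omega) h)

-- invariant of B's ascending scan: st summarizes the already-processed b < k
def BInv (s seq : List Int) (k : Nat) (st : Nat × Nat) : Prop :=
  (st = (0, seq.length - 1) ∧ ∀ b, b < k → ¬ okB s seq b) ∨
  (∃ bs : Nat, st = (mlv s seq bs, bs) ∧ okB s seq bs ∧ bs < k ∧
    ∀ b, b < k → okB s seq b →
      mlv s seq b ≤ mlv s seq bs ∧ (mlv s seq b = mlv s seq bs → b ≤ bs))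

-- one ascending step of B preserves the invariant
theorem bStep_inv (s seq : List Int) (z : List Nat) (k : Nat) (st : Nat × Nat)
    (hk : k < seq.length - 1)
    (hz : z[s.length + 1 + (seq.length - 1 - k)]! = mlv s seq k)
    (h : BInv s seq k st) :
    BInv s seq (k + 1) (bestStep z s.length seq.length st k) := by
  unfold bestStep
  rw [hz]
  show BInv s seq (k + 1)
    (if mlv s seq k = min (k + 1) s.length ∧ st.1 ≤ mlv s seq k
      then (mlv s seq k, k) else st)
  by_cases hok : okB s seq k
  · by_cases hup : st.1 ≤ mlv s seq k
    · rw [if_pos ⟨hok, hup⟩]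
      right
      refine ⟨k, rfl, hok, Nat.lt_succ_self k, ?_⟩
      intro b hb hbo
      rcases Nat.lt_succ_iff_lt_or_eq.mp hb with hb' | rfl
      · rcases h with ⟨hst, hall⟩ | ⟨bs, hst, hbok, hbk, hball⟩
        · exact absurd hbo (hall b hb')
        · have h1 := hball b hb' hbo
          have h2 : st.1 = mlv s seq bs := by rw [hst]
          exact ⟨by omega, fun _ => by omega⟩
      · exact ⟨le_refl _, fun _ => le_refl _⟩
    · rw [if_neg (by tauto)]
      rcases h with ⟨hst, hall⟩ | ⟨bs, hst, hbok, hbk, hball⟩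
      · exact absurd (by rw [hst]; exact Nat.zero_le _) hup
      · right
        have h2 : st.1 = mlv s seq bs := by rw [hst]
        refine ⟨bs, hst, hbok, by omega, ?_⟩
        intro b hb hbo
        rcases Nat.lt_succ_iff_lt_or_eq.mp hb with hb' | rfl
        · exact hball b hb' hbo
        · exact ⟨by omega, fun _ => by omega⟩
  · rw [if_neg (by tauto)]
    rcases h with ⟨hst, hall⟩ | ⟨bs, hst, hbok, hbk, hball⟩
    · left
      refine ⟨hst, ?_⟩
      intro b hb
      rcases Nat.lt_succ_iff_lt_or_eq.mp hb with hb' | rfl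
      · exact hall b hb'
      · exact hok
    · right
      refine ⟨bs, hst, hbok, by omega, ?_⟩
      intro b hb hbo
      rcases Nat.lt_succ_iff_lt_or_eq.mp hb with hb' | rfl
      · exact hball b hb' hbo
      · exact absurd hbo hok

-- B's whole ascending loop
theorem bfold_inv (s seq : List Int) (z : List Nat) :
    ∀ (k : Nat), k ≤ seq.length - 1 →
      (∀ b, b < k → z[s.length + 1 + (seq.length - 1 - b)]! = mlv s seq b) →
      BInv s seq k
        ((List.range k).foldl (bestStep z s.length seq.length) (0, seq.length - 1)) := by
  intro k
  induction k with
  | zero =>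
    intro _ _
    exact Or.inl ⟨rfl, by omega⟩
  | succ k ih =>
    intro hk hz
    rw [List.range_succ, List.foldl_append]
    simp only [List.foldl_cons, List.foldl_nil]
    exact bStep_inv s seq z k _ (by omega) (hz k (by omega))
      (ih (by omega) (fun b hb => hz b (by omega)))

-- the Z-array of t = rev s ++ [none] ++ rev seq recovers A's match lengths
theorem z_bridge (s seq : List Int) :
    ∀ b, b < seq.length - 1 →
      (((List.range' 1 ((s.reverse.map some ++ [none] ++ seq.reverse.map some : List (Option Int)).length - 1)).foldl
          (zStep (s.reverse.map some ++ [none] ++ seq.reverse.map some))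
          (List.replicate (s.reverse.map some ++ [none] ++ seq.reverse.map some : List (Option Int)).length 0, 0, 0)).1)[s.length + 1 + (seq.length - 1 - b)]!
        = mlv s seq b := by
  set t : List (Option Int) := s.reverse.map some ++ [none] ++ seq.reverse.map some with ht
  have hL : t.length = s.length + 1 + seq.length := by
    rw [ht]
    simp only [List.length_append, List.length_map, List.length_reverse,
      List.length_cons, List.length_nil]
  have hinit : ZInv t 1 (List.replicate t.length 0, 0, 0) := by
    refine ⟨by simp, ?_, Or.inl ⟨rfl, rfl⟩⟩
    intro j hj1 hj2
    omega
  have hfin := zLoop_inv t (t.length - 1) 1 (List.replicate t.length 0, 0, 0)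
    (le_refl 1) (by omega) hinit
  rw [show 1 + (t.length - 1) = t.length by omega] at hfin
  obtain ⟨hlen, hzv, -⟩ := hfin
  intro b hb
  set k := seq.length - 1 - b with hkdef
  have hk1 : 1 ≤ k := by omega
  have hkn : k ≤ seq.length - 1 := by omega
  have hiL : s.length + 1 + k < t.length := by omega
  rw [hzv (s.length + 1 + k) (by omega) hiL]
  -- zval t (m+1+k) = mlv s seq b
  unfold zval
  have hdrop : t.drop (s.length + 1 + k) = ((seq.reverse.drop k).map some : List (Option Int)) := by
    rw [ht, List.drop_append]
    rw [List.drop_eq_nil_of_le (by simp)]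
    simp only [List.nil_append]
    have he : s.length + 1 + k - (s.reverse.map some ++ [none] : List (Option Int)).length = k := by
      simp
    rw [he]
    have hmd : ∀ (l : List Int) (j : Nat), (l.map some).drop j = (l.drop j).map some := by
      intro l
      induction l with
      | nil => intro j; simp
      | cons a l ih =>
        intro j
        cases j with
        | zero => simp
        | succ j' => simpa using ih j'
    exact hmd seq.reverse k
  rw [hdrop]
  have hrev : seq.reverse.drop k = (seq.take (b + 1)).reverse := by
    rw [List.drop_reverse]
    have he2 : seq.length - k = b + 1 := by omega
    rw [he2]
  rw [hrev]
  have ht2 : t = s.reverse.map some ++ (none :: (seq.reverse.map some : List (Option Int))) := by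
    rw [ht, List.append_assoc]
    rfl
  rw [ht2, lcpN_sep, lcpN_comm]
  rfl

-- the two programs agree everywhere
theorem ab_eq (s seq : List Int) : match_seq s seq = match_seq_alt s seq := by
  have hlist : PySem.List.pyRange ((seq.length : Int) - 2) (-1) (-1)
      = ((List.range (seq.length - 1)).map (fun (k : Nat) => (k : Int))).reverse := by
    rw [PySem.List.pyRange_neg_one_eq_reverse]
    congr 1
    have e1 : (-1 : Int) + 1 = 0 := by norm_num
    have e2 : ((seq.length : Int) - 2) + 1 = (seq.length : Int) - 1 := by ring
    rw [e1, e2, PySem.List.pyRange_one]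
    have e3 : (((seq.length : Int) - 1) - 0).toNat = seq.length - 1 := by omega
    rw [e3]
    exact List.map_congr_left (fun a _ => by ring)
  have hA : AInv s seq 0 ((List.range (seq.length - 1)).foldr
      (fun (j : Nat) st => matchSeqStep s seq st (j : Int)) (0, (seq.length : Int) - 1)) :=
    afold_inv s seq (seq.length - 1) (le_refl _) _
      (Or.inl ⟨rfl, fun b hb1 hb2 _ => absurd hb2 (by omega)⟩)
  have hB := bfold_inv s seq
    (((List.range' 1 ((s.reverse.map some ++ [none] ++ seq.reverse.map some : List (Option Int)).length - 1)).foldl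
        (zStep (s.reverse.map some ++ [none] ++ seq.reverse.map some))
        (List.replicate (s.reverse.map some ++ [none] ++ seq.reverse.map some : List (Option Int)).length 0, 0, 0)).1)
    (seq.length - 1) (le_refl _) (fun b hb => z_bridge s seq b hb)
  simp only [match_seq, match_seq_alt]
  rw [hlist, List.foldl_reverse, List.foldr_map]
  rcases hA with ⟨hstA, hallA⟩ | ⟨bsA, hstA, hokA, -, hbnA, hposA, hballA⟩
  · rw [hstA]
    rcases hB with ⟨hstB, hallB⟩ | ⟨bsB, hstB, hokB, hbnB, hballB⟩
    · rw [hstB]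
      norm_num
    · have h0 : mlv s seq bsB = 0 := hallA bsB (Nat.zero_le _) hbnB hokB
      rw [hstB, h0]
      norm_num
  · rcases hB with ⟨hstB, hallB⟩ | ⟨bsB, hstB, hokB, hbnB, hballB⟩
    · exact absurd hokA (hallB bsA hbnA)
    · have h1 := hballB bsA hbnA hokA
      have h2 := hballA bsB (Nat.zero_le _) hbnB hokB
      have heqv : mlv s seq bsA = mlv s seq bsB := by omega
      have heqb : bsA = bsB := by
        have := h1.2 heqv
        have := h2.2 heqv.symm
        omega
      subst heqb
      rw [hstA, hstB]
      dsimp only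
      by_cases h3 : mlv s seq bsA < 3
      · rw [if_pos (by exact_mod_cast h3), if_pos h3]
      · rw [if_neg (by exact_mod_cast h3), if_neg h3]
        have harg : PySem.List.pyGet? seq (((bsA : Nat) : Int) + 1) = seq[bsA + 1]? := by
          rw [show ((bsA : Nat) : Int) + 1 = ((bsA + 1 : Nat) : Int) by push_cast; ring,
            PySem.List.pyGet?_natCast]
        rw [harg]

-- ===== VERDICT =====

theorem match_seq_spec : Claim_equal_match_seq := by
  intro s seq _
  unfold Spec_match_seq
  exact ab_eq s seq
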